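-- pv_equiv track=rewrite | github.com/laurioma/aoc | 2023/17/prog.py | straight_len
-- ===== SOURCE A (Python) =====
-- def dir(p1, p2):
--     return (p1[0] - p2[0], p1[1] - p2[1])
--
-- def straight_len(path):
--     if len(path) < 1:
--         return 1
--     slen = 0
--     pdir = None
--     for c in range(1, len(path)):
--         ndir = dir(path[-c], path[-(c+1)])
--         if pdir != None and pdir != ndir:
--             break
--         slen += 1
--         pdir = ndir
--     return slen
-- ===== SOURCE B (Python) =====
-- def straight_len(path):
--     if len(path) < 1:
--         return 1
--     dirs = [(path[i][0] - path[i - 1][0], path[i][1] - path[i - 1][1])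
--             for i in range(1, len(path))]
--     run = 0
--     last = None
--     for d in dirs:
--         if last == d:
--             run += 1
--         else:
--             run = 1
--             last = d
--     return run
-- ===== Notes on version B (the rewrite author's own statement) =====
-- stated objective: idiomatic
-- what changed: A scans the path backward with negative indices and an early break; B builds the forward list of step directions once and computes the trailing run length with a single forward reset-counter pass, no early exit and no negative indexing.
import Mathlib
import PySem

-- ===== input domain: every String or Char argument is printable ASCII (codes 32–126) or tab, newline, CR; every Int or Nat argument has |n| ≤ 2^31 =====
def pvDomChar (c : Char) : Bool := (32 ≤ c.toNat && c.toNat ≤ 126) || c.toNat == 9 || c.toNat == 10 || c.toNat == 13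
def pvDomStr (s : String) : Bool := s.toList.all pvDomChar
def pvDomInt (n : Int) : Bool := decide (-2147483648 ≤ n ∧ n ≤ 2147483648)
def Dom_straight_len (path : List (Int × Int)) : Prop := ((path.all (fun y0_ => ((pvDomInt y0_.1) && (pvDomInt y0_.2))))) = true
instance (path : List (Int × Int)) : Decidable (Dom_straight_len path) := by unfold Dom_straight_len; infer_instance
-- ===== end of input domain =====

-- B replaces A's backward early-break scan by a forward direction list plus a reset-counter pass (idiomatic; same cost).


-- ===== PORT A =====
-- the loop `for c in range(1, len(path)): … break …` with state (slen, pdir)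
def strLoopA (path : List (Int × Int)) (c : Nat) (slen : Int) (pdir : Option (Int × Int)) : Int :=
  if h : c < path.length then
    match PySem.List.pyGet? path (-(c : Int)), PySem.List.pyGet? path (-((c : Int) + 1)) with
    | some p1, some p2 =>
        let ndir : Int × Int := (p1.1 - p2.1, p1.2 - p2.2)
        if pdir ≠ none ∧ pdir ≠ some ndir then slen
        else strLoopA path (c + 1) (slen + 1) (some ndir)
    | _, _ => slen  -- unreachable: for 1 ≤ c < len both indices are in range (Python never raises here)
  else slen
termination_by path.length - c

def straight_len (path : List (Int × Int)) : Int :=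
  if path.length < 1 then 1 else strLoopA path 1 0 none

-- ===== PORT B =====
-- dirs = [(path[i][0]-path[i-1][0], path[i][1]-path[i-1][1]) for i in range(1, len(path))]
-- (ported by hand as the adjacent-pairs recursion; exact: positive indices i-1, i are always in range)
def dirsOf : List (Int × Int) → List (Int × Int)
  | a :: b :: rest => (b.1 - a.1, b.2 - a.2) :: dirsOf (b :: rest)
  | _ => []

-- the forward pass `for d in dirs: …` with state (run, last)
def runFold : List (Int × Int) → Int → Option (Int × Int) → Int
  | [], run, _ => run
  | d :: rest, run, last =>
      if last = some d then runFold rest (run + 1) last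
      else runFold rest 1 (some d)

def straight_len_alt (path : List (Int × Int)) : Int :=
  if path.length < 1 then 1 else runFold (dirsOf path) 0 none

-- ===== PRECONDITION & SPEC =====
def Spec_straight_len (path : List (Int × Int)) (out : Int) : Prop := out = straight_len_alt path
instance (path : List (Int × Int)) (out : Int) : Decidable (Spec_straight_len path out) := by unfold Spec_straight_len; infer_instance

-- ===== CLAIM (what is proved, stated in full; the proofs are below) =====
def Claim_equal_straight_len : Prop := ∀ (path : List (Int × Int)), Dom_straight_len path → Spec_straight_len path (straight_len path)

-- ===== LEMMAS AND PROOFS =====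

-- A's loop, re-expressed as a recursion over the (reversed) direction list
def goRev : List (Int × Int) → Int → Option (Int × Int) → Int
  | [], slen, _ => slen
  | d :: rest, slen, pdir =>
      if pdir ≠ none ∧ pdir ≠ some d then slen else goRev rest (slen + 1) (some d)

-- length of the initial run of equal elements
def runInit : List (Int × Int) → Int
  | [] => 0
  | d :: rest => 1 + ((rest.takeWhile (fun x => x = d)).length : Int)

theorem dirsOf_length (l : List (Int × Int)) : (dirsOf l).length = l.length - 1 := by
  induction l with
  | nil => simp [dirsOf]
  | cons a t ih =>
    cases t with
    | nil => simp [dirsOf]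
    | cons b r => simp [dirsOf] at ih ⊢; omega

theorem dirsOf_get? (l : List (Int × Int)) (i : Nat) (a b : Int × Int)
    (ha : l[i]? = some a) (hb : l[i + 1]? = some b) :
    (dirsOf l)[i]? = some (b.1 - a.1, b.2 - a.2) := by
  induction l generalizing i with
  | nil => simp at ha
  | cons x t ih =>
    cases t with
    | nil =>
      cases i with
      | zero => simp at hb
      | succ j => simp at hb
    | cons y r =>
      cases i with
      | zero =>
        simp at ha hb
        subst ha; subst hb
        simp [dirsOf]
      | succ j =>
        simp only [List.getElem?_cons_succ] at ha hb
        simpa [dirsOf] using ih j ha hb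

theorem goRev_some (l : List (Int × Int)) (slen : Int) (d : Int × Int) :
    goRev l slen (some d) = slen + ((l.takeWhile (fun x => x = d)).length : Int) := by
  induction l generalizing slen d with
  | nil => simp [goRev]
  | cons x t ih =>
    by_cases hx : x = d
    · subst hx
      simp only [goRev, List.takeWhile]
      have : ¬ ((some x : Option (Int × Int)) ≠ none ∧ (some x : Option (Int × Int)) ≠ some x) := by
        simp
      rw [if_neg this, ih]
      simp only [decide_true, List.length_cons]
      push_cast
      ring
    · simp only [goRev, List.takeWhile]
      have : ((some d : Option (Int × Int)) ≠ none ∧ (some d : Option (Int × Int)) ≠ some x) :=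
        ⟨by simp, by simp [Ne.symm hx]⟩
      rw [if_pos this]
      simp [hx]

theorem goRev_none (l : List (Int × Int)) : goRev l 0 none = runInit l := by
  cases l with
  | nil => rfl
  | cons d rest =>
    simp only [goRev, runInit]
    have : ¬ ((none : Option (Int × Int)) ≠ none ∧ (none : Option (Int × Int)) ≠ some d) := by simp
    rw [if_neg this, goRev_some]
    ring

-- appending one element after a list that is not all-d leaves the initial run unchanged
theorem runInit_append_last (m : List (Int × Int)) (d : Int × Int)
    (hm : m ≠ []) (h : ∃ x ∈ m, x ≠ d) :
    runInit (m ++ [d]) = runInit m := by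
  cases m with
  | nil => exact absurd rfl hm
  | cons y ys =>
    simp only [List.cons_append, runInit]
    congr 1
    rw [List.takeWhile_append]
    by_cases hall : ∀ x ∈ ys, x = y
    · have hty : ys.takeWhile (fun x => x = y) = ys := by
        rw [List.takeWhile_eq_self_iff]
        intro x hx; simp [hall x hx]
      rw [if_pos (by rw [hty])]
      have hyd : y ≠ d := by
        rcases h with ⟨x, hx, hxd⟩
        rcases List.mem_cons.mp hx with h1 | h2
        · exact h1 ▸ hxd
        · exact (hall x h2) ▸ hxd
      have hdy : d ≠ y := Ne.symm hyd
      simp [hty, List.takeWhile, hdy]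
    · have hty : ¬ ys.takeWhile (fun x => x = y) = ys := by
        rw [List.takeWhile_eq_self_iff]
        push_neg
        push_neg at hall
        rcases hall with ⟨x, hx, hxy⟩
        exact ⟨x, hx, by simp [hxy]⟩
      have hlen : ¬ (ys.takeWhile (fun x => x = y)).length = ys.length := by
        intro hl
        exact hty ((List.takeWhile_prefix _).eq_of_length hl)
      rw [if_neg hlen]

theorem runFold_spec (l : List (Int × Int)) : ∀ (run : Int) (last : Option (Int × Int)),
    l ≠ [] →
    runFold l run last =
      if ∀ x ∈ l, last = some x then run + (l.length : Int) else runInit l.reverse := by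
  induction l with
  | nil => intro _ _ h; exact absurd rfl h
  | cons d rest ih =>
    intro run last _
    by_cases hld : last = some d
    · subst hld
      simp only [runFold]
      cases hrest : rest with
      | nil =>
        simp [runFold]
      | cons r rs =>
        rw [← hrest, ih (run + 1) (some d) (by simp [hrest])]
        by_cases hall : ∀ x ∈ rest, (some d : Option (Int × Int)) = some x
        · rw [if_pos hall]
          have : ∀ x ∈ d :: rest, (some d : Option (Int × Int)) = some x := by
            intro x hx
            rcases List.mem_cons.mp hx with h1 | h2
            · simp [h1]
            · exact hall x h2
          rw [if_pos this]
          simp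
          ring
        · rw [if_neg hall]
          have hne : ¬ ∀ x ∈ d :: rest, (some d : Option (Int × Int)) = some x := by
            intro hc
            exact hall (fun x hx => hc x (List.mem_cons_of_mem d hx))
          rw [if_neg hne]
          have hex : ∃ x ∈ rest.reverse, x ≠ d := by
            push_neg at hall
            rcases hall with ⟨x, hx, hxd⟩
            exact ⟨x, List.mem_reverse.mpr hx, fun he => hxd (by simp [he])⟩
          have := runInit_append_last rest.reverse d (by simp [hrest]) hex
          simp only [List.reverse_cons]
          rw [this]
          simp
    · simp only [runFold, if_neg hld]
      cases hrest : rest with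
      | nil =>
        have hne : ¬ ∀ x ∈ [d], last = some x := fun hc => hld (hc d (by simp))
        rw [if_neg hne]
        simp [runFold, runInit]
      | cons r rs =>
        rw [← hrest, ih 1 (some d) (by simp [hrest])]
        have hne : ¬ ∀ x ∈ d :: rest, last = some x := by
          intro hc
          exact hld (hc d (List.mem_cons_self))
        rw [if_neg hne]
        by_cases hall : ∀ x ∈ rest, (some d : Option (Int × Int)) = some x
        · rw [if_pos hall]
          -- every element equals d: the whole reversed list is one run
          have hconst : ∀ x ∈ (d :: rest).reverse, x = d := by
            intro x hx
            rcases List.mem_cons.mp (List.mem_reverse.mp hx) with h1 | h2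
            · exact h1
            · exact ((Option.some.injEq _ _).mp (hall x h2)).symm ▸ rfl
          cases hrev : (d :: rest).reverse with
          | nil => simp at hrev
          | cons z zs =>
            have hz : z = d := hconst z (by simp [hrev])
            have hzs : ∀ x ∈ zs, x = z := by
              intro x hx
              rw [hz]
              exact hconst x (by simp [hrev, hx])
            simp only [runInit]
            have : zs.takeWhile (fun x => x = z) = zs := by
              rw [List.takeWhile_eq_self_iff]
              intro x hx; simp [hzs x hx]
            rw [this]
            have hlen : zs.length = rest.length := by
              have h := congrArg List.length hrev
              simp at h
              omega
            simp [hlen]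
        · rw [if_neg hall]
          have hex : ∃ x ∈ rest.reverse, x ≠ d := by
            push_neg at hall
            rcases hall with ⟨x, hx, hxd⟩
            exact ⟨x, List.mem_reverse.mpr hx, fun he => hxd (by simp [he])⟩
          have := runInit_append_last rest.reverse d (by simp [hrest]) hex
          simp only [List.reverse_cons]
          rw [this]

-- the bridge: A's indexed backward loop equals goRev on the reversed direction list
theorem strLoopA_eq_goRev (path : List (Int × Int)) :
    ∀ (k c : Nat) (slen : Int) (pdir : Option (Int × Int)),
      path.length - c = k → 1 ≤ c →
      strLoopA path c slen pdir = goRev ((dirsOf path).reverse.drop (c - 1)) slen pdir := by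
  intro k
  induction k with
  | zero =>
    intro c slen pdir hk hc
    have hcl : ¬ c < path.length := by omega
    rw [strLoopA, dif_neg hcl]
    have : (dirsOf path).reverse.drop (c - 1) = [] := by
      apply List.drop_eq_nil_of_le
      rw [List.length_reverse, dirsOf_length]
      omega
    rw [this]
    rfl
  | succ k ih =>
    intro c slen pdir hk hc
    have hcl : c < path.length := by omega
    have hn : 1 ≤ path.length := by omega
    -- the two negative indices resolve to positions (len - c) and (len - c - 1)
    have h1 : PySem.List.pyGet? path (-(c : Int)) = path[path.length - c]? :=
      PySem.List.pyGet?_neg_natCast path c (by omega) (by omega)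
    have h2 : PySem.List.pyGet? path (-((c : Int) + 1)) = path[path.length - (c + 1)]? := by
      have : -((c : Int) + 1) = -(((c + 1 : Nat) : Int)) := by push_cast; ring
      rw [this]
      exact PySem.List.pyGet?_neg_natCast path (c + 1) (by omega) (by omega)
    have hb : path.length - c < path.length := by omega
    have ha : path.length - (c + 1) < path.length := by omega
    have hget1 : path[path.length - c]? = some path[path.length - c] := List.getElem?_eq_getElem hb
    have hget2 : path[path.length - (c + 1)]? = some path[path.length - (c + 1)] :=
      List.getElem?_eq_getElem ha
    -- identify the head of the dropped reversed dirs list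
    have hEl : c - 1 < (dirsOf path).reverse.length := by
      rw [List.length_reverse, dirsOf_length]; omega
    have hdrop : (dirsOf path).reverse.drop (c - 1) =
        (dirsOf path).reverse[c - 1] :: (dirsOf path).reverse.drop c := by
      have hc1 : c - 1 + 1 = c := by omega
      rw [← List.getElem_cons_drop hEl, hc1]
    have hrevget : (dirsOf path).reverse[c - 1] =
        (path[path.length - c].1 - path[path.length - (c + 1)].1,
         path[path.length - c].2 - path[path.length - (c + 1)].2) := by
      rw [List.getElem_reverse]
      have hlt : (dirsOf path).length - 1 - (c - 1) < (dirsOf path).length := by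
        rw [dirsOf_length]; omega
      have hg : (dirsOf path)[(dirsOf path).length - 1 - (c - 1)]? =
          some (path[path.length - c].1 - path[path.length - (c + 1)].1,
                path[path.length - c].2 - path[path.length - (c + 1)].2) := by
        have hidx : (dirsOf path).length - 1 - (c - 1) = path.length - 1 - c := by
          rw [dirsOf_length]; omega
        rw [hidx]
        apply dirsOf_get? path (path.length - 1 - c) path[path.length - (c + 1)] path[path.length - c]
        · have : path.length - 1 - c = path.length - (c + 1) := by omega
          rw [this]; exact hget2
        · have : path.length - 1 - c + 1 = path.length - c := by omega
          rw [this]; exact hget1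
      rw [List.getElem?_eq_getElem hlt] at hg
      exact Option.some_injective _ hg
    rw [strLoopA, dif_pos hcl, h1, h2, hget1, hget2, hdrop, hrevget]
    simp only [goRev]
    set ndir := (path[path.length - c].1 - path[path.length - (c + 1)].1,
                 path[path.length - c].2 - path[path.length - (c + 1)].2) with hnd
    by_cases hbr : pdir ≠ none ∧ pdir ≠ some ndir
    · rw [if_pos hbr, if_pos hbr]
    · rw [if_neg hbr, if_neg hbr]
      have := ih (c + 1) (slen + 1) (some ndir) (by omega) (by omega)
      simpa using this

-- ===== VERDICT (by name: the statement is the Claim_ definition above) =====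
theorem straight_len_spec : Claim_equal_straight_len := by
  intro path _
  unfold Spec_straight_len straight_len straight_len_alt
  by_cases hp : path.length < 1
  · rw [if_pos hp, if_pos hp]
  · rw [if_neg hp, if_neg hp]
    have hA := strLoopA_eq_goRev path (path.length - 1) 1 0 none rfl (by omega)
    simp only [Nat.sub_self, List.drop_zero] at hA
    rw [hA, goRev_none]
    cases hD : dirsOf path with
    | nil => simp [runFold, runInit]
    | cons d rest =>
      rw [runFold_spec (d :: rest) 0 none (by simp)]
      have hne : ¬ ∀ x ∈ d :: rest, (none : Option (Int × Int)) = some x := by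
        intro hc
        simpa using hc d (by simp)
      rw [if_neg hne, ← hD]
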